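-- pv_equiv track=rewrite | github.com/YuyZhang/Intermediate-Training | Entropy-based_Algorithm/direct_filtering.py | occurrences_time
-- ===== SOURCE A (Python) =====
-- def occurrences_time(a, log):
--     result = 0
--     for k in range(len(log)):
--         for i in range(len(log[k]) - len(a) + 1):
--             j = 0
--             while j < len(a):
--                 if log[k][i + j] == a[j]:
--                     j = j + 1
--                 else:
--                     break
--             if j >= len(a):
--                 result = result + 1
--     return result
-- ===== SOURCE B (Python) =====
-- # Rabin-Karp rolling-hash matcher with explicit verification on hash hits,
-- # instead of A's per-position character-by-character scan.
-- MOD = (1 << 61) - 1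
-- BASE = 131
--
--
-- def occurrences_time(a, log):
--     m = len(a)
--     ha = 0
--     for x in a:
--         ha = (ha * BASE + x) % MOD
--     powm = pow(BASE, m, MOD)
--     total = 0
--     for seq in log:
--         n = len(seq)
--         if m > n:
--             continue
--         h = 0
--         for x in seq[:m]:
--             h = (h * BASE + x) % MOD
--         if h == ha and seq[:m] == a:
--             total += 1
--         for i in range(1, n - m + 1):
--             h = (h * BASE + seq[i + m - 1] - seq[i - 1] * powm) % MOD
--             if h == ha and seq[i:i + m] == a:
--                 total += 1
--     return total
-- ===== Notes on version B (the rewrite author's own statement) =====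
-- stated objective: alternative
-- what changed: Replaces A's naive per-position element-by-element comparison loop with a Rabin-Karp rolling hash over each sequence, verifying the window against the pattern only on hash hits.
import Mathlib
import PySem

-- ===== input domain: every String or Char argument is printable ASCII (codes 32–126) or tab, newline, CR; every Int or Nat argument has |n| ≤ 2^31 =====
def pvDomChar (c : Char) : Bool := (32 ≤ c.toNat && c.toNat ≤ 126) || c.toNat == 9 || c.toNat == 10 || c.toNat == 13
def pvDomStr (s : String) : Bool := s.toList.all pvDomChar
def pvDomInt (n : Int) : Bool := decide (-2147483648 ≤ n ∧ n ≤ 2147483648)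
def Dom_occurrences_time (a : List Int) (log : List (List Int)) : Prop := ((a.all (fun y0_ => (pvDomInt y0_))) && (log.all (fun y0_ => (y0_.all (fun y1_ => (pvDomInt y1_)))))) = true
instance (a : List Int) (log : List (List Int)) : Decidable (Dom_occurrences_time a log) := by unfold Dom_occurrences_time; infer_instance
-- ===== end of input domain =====

-- B replaces A's per-position element-by-element scan by a Rabin-Karp rolling hash with
-- explicit verification on hash hits (objective: alternative algorithm; not measurably faster).

-- ===== PORT A =====
-- the inner `while j < len(a)` loop of A; `row[i+j]?`/`a[j]?` port the element accesses
-- (always in range on the indices A reaches, so Option equality is exact there)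
def pvWhileA (a row : List Int) (i j : Nat) : Nat :=
  if j < a.length then
    if row[i + j]? = a[j]? then pvWhileA a row i (j + 1) else j
  else j
termination_by a.length - j

-- `for k in range(len(log))` with only `log[k]` used is folded over the rows directly;
-- Python's range(N) for an int N is List.range N.toNat (empty when N ≤ 0, exactly as in Python)
def occurrences_time (a : List Int) (log : List (List Int)) : Int :=
  log.foldl (fun result row =>
    (List.range ((row.length : Int) - (a.length : Int) + 1).toNat).foldl (fun result i =>
      if a.length ≤ pvWhileA a row i 0 then result + 1 else result) result) 0

-- ===== PORT B =====
def pvMOD : Int := 2305843009213693951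
def pvBASE : Int := 131

-- slices seq[:m] / seq[i:i+m] with Nat bounds are take/drop-take; seq[i+m-1], seq[i-1] are
-- always in range for the i the loop reaches, so getD is exact there; pow(b,e,m) is PySem.Int.powMod
def occurrences_time_alt (a : List Int) (log : List (List Int)) : Int :=
  let m := a.length
  let ha := a.foldl (fun h x => PySem.Int.mod (h * pvBASE + x) pvMOD) 0
  let powm := PySem.Int.powMod pvBASE m pvMOD
  log.foldl (fun total seq =>
    let n := seq.length
    if m > n then total
    else
      let h := (seq.take m).foldl (fun h x => PySem.Int.mod (h * pvBASE + x) pvMOD) 0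
      let total := if h = ha ∧ seq.take m = a then total + 1 else total
      ((List.range' 1 (n - m)).foldl
        (fun (st : Int × Int) i =>
          let h' := PySem.Int.mod (st.1 * pvBASE + seq.getD (i + m - 1) 0 - seq.getD (i - 1) 0 * powm) pvMOD
          (h', if h' = ha ∧ (seq.drop i).take m = a then st.2 + 1 else st.2))
        (h, total)).2) 0

-- ===== PRECONDITION & SPEC =====
def Spec_occurrences_time (a : List Int) (log : List (List Int)) (out : Int) : Prop := out = occurrences_time_alt a log
instance (a : List Int) (log : List (List Int)) (out : Int) : Decidable (Spec_occurrences_time a log out) := by unfold Spec_occurrences_time; infer_instance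

-- ===== CLAIM (what is proved, stated in full; the proofs are below) =====
def Claim_equal_occurrences_time : Prop := ∀ (a : List Int) (log : List (List Int)), Dom_occurrences_time a log → Spec_occurrences_time a log (occurrences_time a log)

-- ===== LEMMAS AND PROOFS =====

-- the Horner hash both programs compute, and its un-reduced polynomial value
def pvH (l : List Int) : Int := l.foldl (fun h x => PySem.Int.mod (h * pvBASE + x) pvMOD) 0
def pvPoly (c : Int) (l : List Int) : Int := l.foldl (fun h x => h * pvBASE + x) c

theorem pvMOD_pos : (0 : Int) < pvMOD := by norm_num [pvMOD]

theorem pvPoly_shift (l : List Int) (c : Int) :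
    pvPoly c l = c * pvBASE ^ l.length + pvPoly 0 l := by
  induction l generalizing c with
  | nil => simp [pvPoly]
  | cons z t ih =>
    show pvPoly (c * pvBASE + z) t = c * pvBASE ^ (t.length + 1) + pvPoly (0 * pvBASE + z) t
    rw [ih (c * pvBASE + z), ih (0 * pvBASE + z)]
    ring

theorem pvH_eq (l : List Int) : pvH l = pvPoly 0 l % pvMOD := by
  induction l using List.reverseRecOn with
  | nil => simp [pvH, pvPoly]
  | append_singleton t y ih =>
    have h1 : pvH (t ++ [y]) = PySem.Int.mod (pvH t * pvBASE + y) pvMOD := by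
      simp [pvH, List.foldl_append]
    have h2 : pvPoly 0 (t ++ [y]) = pvPoly 0 t * pvBASE + y := by
      simp [pvPoly, List.foldl_append]
    rw [h1, h2, ih, PySem.Int.mod_eq_emod_of_pos pvMOD_pos]
    have hme : Int.ModEq pvMOD (pvPoly 0 t % pvMOD) (pvPoly 0 t) :=
      Int.emod_emod_of_dvd _ dvd_rfl
    exact (hme.mul_right pvBASE).add_right y

theorem pvRoll (x y : Int) (t : List Int) :
    PySem.Int.mod (pvH (x :: t) * pvBASE + y - x * PySem.Int.powMod pvBASE (t.length + 1) pvMOD) pvMOD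
      = pvH (t ++ [y]) := by
  have e1 : pvPoly 0 (x :: t) = x * pvBASE ^ t.length + pvPoly 0 t := by
    show pvPoly (0 * pvBASE + x) t = _
    rw [pvPoly_shift t (0 * pvBASE + x)]; ring
  have e2 : pvPoly 0 (t ++ [y]) = pvPoly 0 t * pvBASE + y := by
    simp [pvPoly, List.foldl_append]
  rw [PySem.Int.powMod, PySem.Int.mod_eq_emod_of_pos pvMOD_pos,
      PySem.Int.mod_eq_emod_of_pos pvMOD_pos, pvH_eq, pvH_eq, e2]
  have c1 : Int.ModEq pvMOD (pvPoly 0 (x :: t) % pvMOD) (pvPoly 0 (x :: t)) :=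
    Int.emod_emod_of_dvd _ dvd_rfl
  have c2 : Int.ModEq pvMOD (pvBASE ^ (t.length + 1) % pvMOD) (pvBASE ^ (t.length + 1)) :=
    Int.emod_emod_of_dvd _ dvd_rfl
  have step : Int.ModEq pvMOD
      (pvPoly 0 (x :: t) % pvMOD * pvBASE + y - x * (pvBASE ^ (t.length + 1) % pvMOD))
      (pvPoly 0 (x :: t) * pvBASE + y - x * pvBASE ^ (t.length + 1)) :=
    ((c1.mul_right pvBASE).add_right y).sub (c2.mul_left x)
  calc (pvPoly 0 (x :: t) % pvMOD * pvBASE + y - x * (pvBASE ^ (t.length + 1) % pvMOD)) % pvMOD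
      = (pvPoly 0 (x :: t) * pvBASE + y - x * pvBASE ^ (t.length + 1)) % pvMOD := step
    _ = (pvPoly 0 t * pvBASE + y) % pvMOD := by rw [e1]; ring_nf

theorem pvWhileA_spec (a row : List Int) (i : Nat) :
    ∀ n j, a.length - j = n → j ≤ a.length →
      (a.length ≤ pvWhileA a row i j ↔ ∀ k, j ≤ k → k < a.length → row[i + k]? = a[k]?) := by
  intro n
  induction n with
  | zero =>
    intro j hn hj
    have hje : j = a.length := by omega
    rw [pvWhileA, if_neg (by omega)]
    constructor
    · intro _ k hk1 hk2; omega
    · intro _; omega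
  | succ n ih =>
    intro j hn hj
    have hjlt : j < a.length := by omega
    rw [pvWhileA, if_pos hjlt]
    by_cases he : row[i + j]? = a[j]?
    · rw [if_pos he]
      rw [ih (j + 1) (by omega) (by omega)]
      constructor
      · intro h k hk1 hk2
        rcases Nat.eq_or_lt_of_le hk1 with rfl | hk
        · exact he
        · exact h k hk hk2
      · intro h k hk1 hk2; exact h k (by omega) hk2
    · rw [if_neg he]
      constructor
      · intro h; omega
      · intro h; exact absurd (h j le_rfl hjlt) he

theorem pvMatch_iff (a row : List Int) (i : Nat) :
    (∀ k, k < a.length → row[i + k]? = a[k]?) ↔ (row.drop i).take a.length = a := by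
  constructor
  · intro h
    apply List.ext_getElem?
    intro k
    by_cases hk : k < a.length
    · rw [List.getElem?_take, if_pos hk, List.getElem?_drop, h k hk]
    · rw [List.getElem?_take, if_neg hk, eq_comm, List.getElem?_eq_none_iff]
      omega
  · intro h k hk
    have := congrArg (fun l => l[k]?) h
    simpa [List.getElem?_take, hk, List.getElem?_drop] using this

theorem pvArow (a row : List Int) (r : Int) :
    (List.range ((row.length : Int) - (a.length : Int) + 1).toNat).foldl (fun result i =>
        if a.length ≤ pvWhileA a row i 0 then result + 1 else result) r
      = r + (List.countP (fun i => decide ((row.drop i).take a.length = a))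
              (List.range (row.length + 1 - a.length)) : Int) := by
  have hN : ((row.length : Int) - (a.length : Int) + 1).toNat = row.length + 1 - a.length := by
    omega
  rw [hN, PySem.List.foldl_ite_add_one (p := fun i => a.length ≤ pvWhileA a row i 0)]
  congr 2
  apply List.countP_congr
  intro i _
  simp only [decide_eq_true_eq]
  rw [pvWhileA_spec a row i (a.length - 0) 0 rfl (Nat.zero_le _)]
  simp only [Nat.zero_le, true_implies]
  exact pvMatch_iff a row i

theorem pvStep (a seq : List Int) (K : Nat) (hK : K + 1 ≤ seq.length - a.length) :
    PySem.Int.mod (pvH ((seq.drop K).take a.length) * pvBASE + seq.getD (K + a.length) 0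
        - seq.getD K 0 * PySem.Int.powMod pvBASE a.length pvMOD) pvMOD
      = pvH ((seq.drop (K + 1)).take a.length) := by
  have hmn : a.length < seq.length := by omega
  by_cases hm0 : a.length = 0
  · have hp : PySem.Int.powMod pvBASE 0 pvMOD = 1 := by
      rw [PySem.Int.powMod, pow_zero, PySem.Int.mod_eq_emod_of_pos pvMOD_pos]
      norm_num [pvMOD]
    rw [hm0, hp]
    simp only [List.take_zero]
    have : pvH ([] : List Int) * pvBASE + seq.getD (K + 0) 0 - seq.getD K 0 * 1 = 0 := by
      simp [pvH]
    rw [this, PySem.Int.mod_eq_emod_of_pos pvMOD_pos]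
    simp [pvH]
  · obtain ⟨s, hs⟩ : ∃ s, a.length = s + 1 := ⟨a.length - 1, by omega⟩
    have hKn : K < seq.length := by omega
    have hKm : K + a.length < seq.length := by omega
    have hsl : s ≤ seq.length - (K + 1) := by omega
    have d1 : (seq.drop K).take a.length = seq.getD K 0 :: (seq.drop (K + 1)).take s := by
      rw [List.drop_eq_getElem_cons hKn, hs, List.take_succ_cons, List.getD_eq_getElem seq 0 hKn]
    have hlen : ((seq.drop (K + 1)).take s).length = s := by
      simp [List.length_take, List.length_drop]; omega
    have d2 : (seq.drop (K + 1)).take a.length = (seq.drop (K + 1)).take s ++ [seq.getD (K + a.length) 0] := by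
      conv_lhs => rw [hs]
      rw [List.take_add_one]
      congr 1
      have h1 : (seq.drop (K + 1))[s]? = seq[K + 1 + s]? := List.getElem?_drop
      have hidx : K + 1 + s = K + a.length := by omega
      have h2 : seq[K + 1 + s]? = some (seq.getD (K + a.length) 0) := by
        rw [hidx, List.getElem?_eq_getElem hKm, List.getD_eq_getElem seq 0 hKm]
      rw [h1, h2]
      rfl
    rw [d1, d2, hs]
    have R := pvRoll (seq.getD K 0) (seq.getD (K + a.length) 0) ((seq.drop (K + 1)).take s)
    rw [hlen, hs] at R
    exact R

theorem pvBloop (a seq : List Int) (t0 : Int) :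
    ∀ K, K ≤ seq.length - a.length →
      (List.range' 1 K).foldl
        (fun (st : Int × Int) i =>
          (PySem.Int.mod (st.1 * pvBASE + seq.getD (i + a.length - 1) 0
              - seq.getD (i - 1) 0 * PySem.Int.powMod pvBASE a.length pvMOD) pvMOD,
           if PySem.Int.mod (st.1 * pvBASE + seq.getD (i + a.length - 1) 0
              - seq.getD (i - 1) 0 * PySem.Int.powMod pvBASE a.length pvMOD) pvMOD = pvH a
              ∧ (seq.drop i).take a.length = a then st.2 + 1 else st.2))
        (pvH (seq.take a.length), t0)
      = (pvH ((seq.drop K).take a.length),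
         t0 + (List.countP (fun i => decide ((seq.drop i).take a.length = a)) (List.range' 1 K) : Int)) := by
  intro K
  induction K with
  | zero => intro _; simp
  | succ K ih =>
    intro hK
    rw [List.range'_concat, List.foldl_append, ih (by omega)]
    simp only [List.foldl_cons, List.foldl_nil, one_mul]
    rw [Nat.add_comm 1 K]
    have e1 : K + 1 + a.length - 1 = K + a.length := by omega
    have e2 : K + 1 - 1 = K := by omega
    rw [e1, e2]
    have hst := pvStep a seq K hK
    rw [hst]
    have hcond : (pvH ((seq.drop (K + 1)).take a.length) = pvH a ∧ (seq.drop (K + 1)).take a.length = a)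
        ↔ ((seq.drop (K + 1)).take a.length = a) := by
      constructor
      · exact fun h => h.2
      · intro h; exact ⟨by rw [h], h⟩
    rw [List.countP_append]
    simp only [List.countP_cons, List.countP_nil]
    by_cases hw : (seq.drop (K + 1)).take a.length = a
    · rw [if_pos (hcond.mpr hw)]
      simp [hw]
      ring
    · rw [if_neg (fun hc => hw (hcond.mp hc))]
      simp [hw]

theorem pvBrow (a seq : List Int) (t0 : Int) :
    (if a.length > seq.length then t0
     else
       ((List.range' 1 (seq.length - a.length)).foldl
          (fun (st : Int × Int) i =>
            (PySem.Int.mod (st.1 * pvBASE + seq.getD (i + a.length - 1) 0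
                - seq.getD (i - 1) 0 * PySem.Int.powMod pvBASE a.length pvMOD) pvMOD,
             if PySem.Int.mod (st.1 * pvBASE + seq.getD (i + a.length - 1) 0
                - seq.getD (i - 1) 0 * PySem.Int.powMod pvBASE a.length pvMOD) pvMOD = pvH a
                ∧ (seq.drop i).take a.length = a then st.2 + 1 else st.2))
          (pvH (seq.take a.length),
           if pvH (seq.take a.length) = pvH a ∧ seq.take a.length = a then t0 + 1 else t0)).2)
      = t0 + (List.countP (fun i => decide ((seq.drop i).take a.length = a))
               (List.range (seq.length + 1 - a.length)) : Int) := by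
  by_cases hmn : a.length > seq.length
  · rw [if_pos hmn]
    have h0 : seq.length + 1 - a.length = 0 := by omega
    rw [h0]
    simp
  · rw [if_neg hmn]
    rw [pvBloop a seq _ (seq.length - a.length) le_rfl]
    have hr : seq.length + 1 - a.length = (seq.length - a.length) + 1 := by omega
    rw [hr, List.range_eq_range', List.range'_succ, List.countP_cons]
    simp only [List.drop_zero]
    by_cases h0 : seq.take a.length = a
    · rw [if_pos ⟨by rw [h0], h0⟩]
      simp [h0]
      ring
    · rw [if_neg (fun hc => h0 hc.2)]
      simp [h0]


-- ===== VERDICT (by name: the statement is the Claim_ definition above) =====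
theorem occurrences_time_spec : Claim_equal_occurrences_time := by
  intro a log _
  unfold Spec_occurrences_time
  have hA : occurrences_time a log
      = log.foldl (fun acc row => acc + (List.countP (fun i => decide ((row.drop i).take a.length = a))
          (List.range (row.length + 1 - a.length)) : Int)) 0 := by
    unfold occurrences_time
    exact PySem.List.foldl_congr_mem log _ _ 0 (fun acc row _ => pvArow a row acc)
  have hB : occurrences_time_alt a log
      = log.foldl (fun acc row => acc + (List.countP (fun i => decide ((row.drop i).take a.length = a))
          (List.range (row.length + 1 - a.length)) : Int)) 0 := by
    unfold occurrences_time_alt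
    exact PySem.List.foldl_congr_mem log _ _ 0 (fun acc seq _ => pvBrow a seq acc)
  rw [hA, hB]
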